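-- pv_equiv track=rewrite | github.com/Nobu0/Haskell-dlist-parser | tool/clean_tsv.py | remove_meta_info
-- ===== SOURCE A (Python) =====
-- def remove_meta_info(typ):
--     tags = [
--         '[HasNoCafRefs,',
--         '[LambdaFormInfo:',
--         '[Arity:',
--         '[Unfolding:',
--         '[TagSig:',
--         '[Strictness:',
--         '[CPR:'
--     ]
--
--     cut_pos = len(typ)
--     for tag in tags:
--         pos = typ.find(tag)
--         if pos != -1:
--             cut_pos = min(cut_pos, pos)
--
--     return typ[:cut_pos].rstrip()
-- ===== SOURCE B (Python) =====
-- TAGS = (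
--     '[HasNoCafRefs,',
--     '[LambdaFormInfo:',
--     '[Arity:',
--     '[Unfolding:',
--     '[TagSig:',
--     '[Strictness:',
--     '[CPR:',
-- )
--
--
-- def remove_meta_info(typ):
--     # single left-to-right scan: cut at the first position where any tag starts
--     for i in range(len(typ)):
--         if typ.startswith(TAGS, i):
--             return typ[:i].rstrip()
--     return typ.rstrip()
-- ===== Notes on version B (the rewrite author's own statement) =====
-- stated objective: idiomatic
-- what changed: Replaces seven independent str.find scans plus a running min with a single left-to-right scan that stops at the first position where any tag starts (tuple-argument str.startswith).
import Mathlib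
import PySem

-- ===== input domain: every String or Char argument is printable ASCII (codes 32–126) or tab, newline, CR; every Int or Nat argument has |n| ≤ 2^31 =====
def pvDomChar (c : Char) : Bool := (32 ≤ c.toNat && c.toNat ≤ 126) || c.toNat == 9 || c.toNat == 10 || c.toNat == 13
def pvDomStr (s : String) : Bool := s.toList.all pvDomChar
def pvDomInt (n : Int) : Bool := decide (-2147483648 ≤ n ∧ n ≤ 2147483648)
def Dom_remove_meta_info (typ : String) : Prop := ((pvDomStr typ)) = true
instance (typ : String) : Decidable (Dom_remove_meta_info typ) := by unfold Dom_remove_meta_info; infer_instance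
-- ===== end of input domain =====

-- B replaces seven independent str.find scans plus a running min with one left-to-right
-- scan that cuts at the first position where any tag starts (idiomatic tuple startswith).

-- ===== PORT A =====
def remove_meta_info (typ : String) : String :=
  let tags : List String :=
    ["[HasNoCafRefs,", "[LambdaFormInfo:", "[Arity:", "[Unfolding:",
     "[TagSig:", "[Strictness:", "[CPR:"]
  let cut_pos : Int := tags.foldl (fun cut_pos tag =>
      let pos := PySem.Str.find typ tag
      if pos ≠ -1 then min cut_pos pos else cut_pos) (PySem.Str.len typ)
  PySem.Str.rstrip (PySem.Str.slice typ none (some cut_pos))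

-- ===== PORT B =====
def pvTAGS : List String :=
  ["[HasNoCafRefs,", "[LambdaFormInfo:", "[Arity:", "[Unfolding:",
   "[TagSig:", "[Strictness:", "[CPR:"]

-- typ.startswith(TAGS, i): does any tag start at the head of the remaining suffix?
def pvHit (tags : List (List Char)) (rest : List Char) : Bool :=
  tags.any (fun t => t.isPrefixOf rest)

-- the 'for i in range(len(typ))' loop with early return: pre = typ[:i], rest = typ[i:]
def pvScanB (tags : List (List Char)) (pre rest : List Char) : List Char :=
  match rest with
  | [] => PySem.Chars.rstrip pre
  | c :: rs =>
    if pvHit tags (c :: rs) then PySem.Chars.rstrip pre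
    else pvScanB tags (pre ++ [c]) rs

def remove_meta_info_alt (typ : String) : String :=
  String.ofList (pvScanB (pvTAGS.map String.toList) [] typ.toList)

-- ===== PRECONDITION & SPEC =====
def Spec_remove_meta_info (typ : String) (out : String) : Prop := out = remove_meta_info_alt typ
instance (typ : String) (out : String) : Decidable (Spec_remove_meta_info typ out) := by unfold Spec_remove_meta_info; infer_instance

-- ===== CLAIM (what is proved, stated in full; the proofs are below) =====
def Claim_equal_remove_meta_info : Prop := ∀ (typ : String), Dom_remove_meta_info typ → Spec_remove_meta_info typ (remove_meta_info typ)

-- ===== LEMMAS AND PROOFS =====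

-- A's fold, on the list-of-chars side
def pvCut (s : List Char) (ts : List (List Char)) (init : Int) : Int :=
  ts.foldl (fun cut_pos t =>
    let pos := PySem.Chars.find s t
    if pos ≠ -1 then min cut_pos pos else cut_pos) init

-- index where B's scan stops
def pvHitIdx (tags : List (List Char)) : List Char → Nat
  | [] => 0
  | c :: rs => if pvHit tags (c :: rs) then 0 else pvHitIdx tags rs + 1

lemma pvHit_iff (tags : List (List Char)) (rest : List Char) :
    pvHit tags rest = true ↔ ∃ t ∈ tags, t <+: rest := by
  simp [pvHit, List.any_eq_true, List.isPrefixOf_iff_prefix]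

lemma pvCut_le_init (s : List Char) (ts : List (List Char)) :
    ∀ init : Int, pvCut s ts init ≤ init := by
  induction ts with
  | nil => intro init; simp [pvCut]
  | cons t ts ih =>
    intro init
    have h := ih (if PySem.Chars.find s t ≠ -1 then min init (PySem.Chars.find s t) else init)
    simp only [pvCut, List.foldl_cons] at h ⊢
    split_ifs at h ⊢ with hf
    · exact le_trans h (min_le_left _ _)
    · exact h

lemma pvCut_le_find (s : List Char) (ts : List (List Char)) :
    ∀ init : Int, ∀ t ∈ ts, PySem.Chars.find s t ≠ -1 →
      pvCut s ts init ≤ PySem.Chars.find s t := by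
  induction ts with
  | nil => intro _ t ht; simp at ht
  | cons u ts ih =>
    intro init t ht hf
    rcases List.mem_cons.mp ht with rfl | ht'
    · have h1 := pvCut_le_init s ts (if PySem.Chars.find s t ≠ -1 then min init (PySem.Chars.find s t) else init)
      simp only [pvCut, List.foldl_cons] at h1 ⊢
      rw [if_pos hf] at h1 ⊢
      exact le_trans h1 (min_le_right _ _)
    · have h1 := ih (if PySem.Chars.find s u ≠ -1 then min init (PySem.Chars.find s u) else init) t ht' hf
      simp only [pvCut, List.foldl_cons] at h1 ⊢
      exact h1

lemma pvCut_cases (s : List Char) (ts : List (List Char)) :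
    ∀ init : Int, pvCut s ts init = init ∨
      ∃ t ∈ ts, PySem.Chars.find s t ≠ -1 ∧ pvCut s ts init = PySem.Chars.find s t := by
  induction ts with
  | nil => intro init; left; simp [pvCut]
  | cons u ts ih =>
    intro init
    have h := ih (if PySem.Chars.find s u ≠ -1 then min init (PySem.Chars.find s u) else init)
    simp only [pvCut, List.foldl_cons] at h ⊢
    rcases h with h | ⟨t, ht, hf, he⟩
    · split_ifs at h ⊢ with hu
      · rcases le_or_gt init (PySem.Chars.find s u) with hle | hlt
        · left; rw [h, min_eq_left hle]
        · right; exact ⟨u, List.mem_cons_self, hu, by rw [h, min_eq_right (le_of_lt hlt)]⟩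
      · left; exact h
    · right; exact ⟨t, List.mem_cons_of_mem _ ht, hf, he⟩

lemma pvCut_nonneg (s : List Char) (ts : List (List Char)) (init : Int) (h0 : 0 ≤ init) :
    0 ≤ pvCut s ts init := by
  rcases pvCut_cases s ts init with h | ⟨t, _, hf, he⟩
  · omega
  · have := PySem.Chars.neg_one_le_find s t
    omega

-- minimality of Chars.find: a prefix match at index j bounds find from above
lemma find_min (s t : List Char) (j : Nat) (h : t <+: s.drop j) :
    PySem.Chars.find s t ≠ -1 ∧ PySem.Chars.find s t ≤ (j : Int) := by
  have hinf : t <:+: s := h.isInfix.trans (s.drop_suffix j).isInfix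
  have hne : PySem.Chars.find s t ≠ -1 := (PySem.Chars.find_ne_neg_one_iff s t).mpr hinf
  refine ⟨hne, ?_⟩
  have hspec := PySem.Chars.findFrom_natCast_spec s t 0 (Nat.zero_le _)
  rw [Nat.cast_zero, PySem.Chars.findFrom_zero] at hspec
  have hspec := hspec hne
  have h0 : 0 ≤ PySem.Chars.find s t := by
    have := PySem.Chars.neg_one_le_find s t; omega
  by_contra hgt
  exact hspec.2.2 j (Nat.zero_le _) (by omega) h

lemma find_prefix (s t : List Char) (h : PySem.Chars.find s t ≠ -1) :
    t <+: s.drop (PySem.Chars.find s t).toNat := by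
  have hspec := PySem.Chars.findFrom_natCast_spec s t 0 (Nat.zero_le _)
  rw [Nat.cast_zero, PySem.Chars.findFrom_zero] at hspec
  exact (hspec h).2.1

lemma pvHitIdx_le (tags : List (List Char)) (s : List Char) :
    pvHitIdx tags s ≤ s.length := by
  induction s with
  | nil => simp [pvHitIdx]
  | cons c rs ih =>
    simp only [pvHitIdx, List.length_cons]
    split_ifs <;> omega

lemma pvHitIdx_not_hit (tags : List (List Char)) (s : List Char) :
    ∀ j < pvHitIdx tags s, pvHit tags (s.drop j) = false := by
  induction s with
  | nil => intro j hj; simp [pvHitIdx] at hj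
  | cons c rs ih =>
    intro j hj
    simp only [pvHitIdx] at hj
    split_ifs at hj with hh
    · omega
    · match j with
      | 0 => simpa using Bool.eq_false_iff.mpr hh
      | j' + 1 => exact ih j' (by omega)

lemma pvHitIdx_hit (tags : List (List Char)) (s : List Char)
    (h : pvHitIdx tags s < s.length) :
    pvHit tags (s.drop (pvHitIdx tags s)) = true := by
  induction s with
  | nil => simp at h
  | cons c rs ih =>
    by_cases hh : pvHit tags (c :: rs) = true
    · simp [pvHitIdx, hh]
    · simp only [pvHitIdx, if_neg hh, List.length_cons, List.drop_succ_cons] at h ⊢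
      exact ih (by omega)

-- the two stopping positions coincide
lemma cut_eq_hitIdx (ts : List (List Char)) (s : List Char) :
    (pvCut s ts (s.length : Int)).toNat = pvHitIdx ts s := by
  have h0 : 0 ≤ pvCut s ts (s.length : Int) := pvCut_nonneg s ts _ (by positivity)
  have hle : pvCut s ts (s.length : Int) ≤ (s.length : Int) := pvCut_le_init s ts _
  set c := pvCut s ts (s.length : Int) with hc
  set n := pvHitIdx ts s with hn
  rcases lt_trichotomy c.toNat n with hlt | heq | hgt
  · exfalso
    have hnle := pvHitIdx_le ts s
    have hclt : c < (s.length : Int) := by omega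
    rcases pvCut_cases s ts (s.length : Int) with h | ⟨t, ht, hf, he⟩
    · rw [← hc] at h; omega
    · rw [← hc] at he
      have hpre : t <+: s.drop c.toNat := by rw [he]; exact find_prefix s t hf
      have : pvHit ts (s.drop c.toNat) = true :=
        (pvHit_iff ts _).mpr ⟨t, ht, hpre⟩
      rw [pvHitIdx_not_hit ts s c.toNat hlt] at this
      exact Bool.false_ne_true this
  · exact heq
  · exfalso
    have hnlt : n < s.length := by omega
    obtain ⟨t, ht, hpre⟩ := (pvHit_iff ts _).mp (pvHitIdx_hit ts s hnlt)
    obtain ⟨hf, hfle⟩ := find_min s t n hpre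
    have := pvCut_le_find s ts (s.length : Int) t ht hf
    rw [← hc] at this
    omega

-- what B's scan computes
lemma pvScanB_spec (tags : List (List Char)) :
    ∀ rest pre : List Char,
      pvScanB tags pre rest = PySem.Chars.rstrip (pre ++ rest.take (pvHitIdx tags rest)) := by
  intro rest
  induction rest with
  | nil => intro pre; simp [pvScanB, pvHitIdx]
  | cons c rs ih =>
    intro pre
    simp only [pvScanB, pvHitIdx]
    split_ifs with hh
    · simp
    · rw [ih (pre ++ [c])]
      simp

-- ===== VERDICT (by name: the statement is the Claim_ definition above) =====
theorem remove_meta_info_spec : Claim_equal_remove_meta_info := by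
  intro typ _
  unfold Spec_remove_meta_info
  set s : List Char := typ.toList with hs
  -- A's fold equals pvCut over the mapped tag list
  have hfold :
      remove_meta_info typ =
        PySem.Str.rstrip (PySem.Str.slice typ none (some (pvCut s (pvTAGS.map String.toList) (s.length : Int)))) := by
    unfold remove_meta_info
    simp only [PySem.Str.find_eq, PySem.Str.len_eq, pvCut, List.foldl_map, pvTAGS, ← hs]
  have h0 : 0 ≤ pvCut s (pvTAGS.map String.toList) (s.length : Int) :=
    pvCut_nonneg _ _ _ (by positivity)
  -- compare the underlying char lists
  have hlist :
      (remove_meta_info typ).toList = (remove_meta_info_alt typ).toList := by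
    rw [hfold]
    unfold remove_meta_info_alt
    rw [pvScanB_spec, String.toList_ofList]
    rw [PySem.Str.toList_rstrip, PySem.Str.toList_slice, PySem.Chars.slice_eq_listSlice]
    rw [PySem.List.slice_to _ h0, ← hs, cut_eq_hitIdx]
    simp
  have h2 := congrArg String.ofList hlist
  rwa [String.ofList_toList, String.ofList_toList] at h2
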